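-- pv_equiv track=rewrite | github.com/epata/Tucil2STIMA-13519120 | src/13519120-graphnfunc.py | preqCourse
-- ===== SOURCE A (Python) =====
-- def convert(arrayOfChar):
--     new = ""
--     for x in arrayOfChar:
--         new += x
--     return new
--
-- def preqCourse(lineSemester):
-- 	preqList = []
-- 	word = []
-- 	i = 0
-- 	for character in lineSemester:
-- 		if (character == ' '):
-- 					continue
-- 		if (character == ',' or character == '.'):
-- 			i+=1
-- 			if (i==1):
-- 				word = []
-- 				continue
-- 			else:
-- 				preqList.append(convert(word))
-- 				word = []
-- 				continue
-- 		word.append(character)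
-- 	return(preqList)
-- ===== SOURCE B (Python) =====
-- def preqCourse(lineSemester):
--     kept = [c for c in lineSemester if c != ' ']
--     cleaned = ''.join(',' if (c == ',' or c == '.') else c for c in kept)
--     parts = cleaned.split(',')
--     return parts[1:-1]
-- ===== Notes on version B (the rewrite author's own statement) =====
-- stated objective: simpler
-- what changed: Replaces A's streaming char loop with a delimiter counter and word accumulator by a build-all-then-slice decomposition: normalize the string (drop spaces, unify '.'/',' to ','), split into all segments at once, and return segments[1:-1].
import Mathlib
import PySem

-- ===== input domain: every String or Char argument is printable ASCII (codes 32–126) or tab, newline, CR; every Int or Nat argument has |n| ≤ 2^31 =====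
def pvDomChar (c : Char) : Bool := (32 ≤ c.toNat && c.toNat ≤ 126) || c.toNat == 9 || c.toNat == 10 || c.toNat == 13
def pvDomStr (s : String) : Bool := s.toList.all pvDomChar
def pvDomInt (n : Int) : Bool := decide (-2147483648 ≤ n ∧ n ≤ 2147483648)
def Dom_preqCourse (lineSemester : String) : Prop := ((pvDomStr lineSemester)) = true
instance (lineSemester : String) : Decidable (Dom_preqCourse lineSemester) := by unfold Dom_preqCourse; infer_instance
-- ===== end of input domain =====

-- B replaces A's streaming character loop with a delimiter counter by a build-all-then-slice
-- decomposition: normalize the string, split it into all segments, return segments[1:-1] (simpler).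

-- ===== PORT A =====
def convert (arrayOfChar : List Char) : String :=
  arrayOfChar.foldl (fun new x => new.push x) ""

-- the body of A's for-loop, on state (preqList, word, i)
def stepA (st : List String × List Char × Int) (character : Char) : List String × List Char × Int :=
  let preqList := st.1; let word := st.2.1; let i := st.2.2
  if character = ' ' then (preqList, word, i)
  else if character = ',' ∨ character = '.' then
    let i' := i + 1
    if i' = 1 then (preqList, ([] : List Char), i')
    else (preqList ++ [convert word], ([] : List Char), i')
  else (preqList, word ++ [character], i)

def preqCourse (lineSemester : String) : List String :=
  (lineSemester.toList.foldl stepA ([], [], 0)).1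

-- ===== PORT B =====
def preqCourse_alt (lineSemester : String) : List String :=
  -- kept = [c for c in lineSemester if c != ' ']
  let kept := lineSemester.toList.filter (fun c => c ≠ ' ')
  -- cleaned = ''.join(',' if c in ',.' else c for c in kept)   (''.join over single chars = String.ofList; exact)
  let cleaned := String.ofList (kept.map (fun c => if c = ',' ∨ c = '.' then ',' else c))
  -- parts = cleaned.split(',')
  let parts := (PySem.Chars.splitOn cleaned.toList [',']).map String.ofList
  -- return parts[1:-1]
  PySem.List.slice parts (some 1) (some (-1))

-- ===== PRECONDITION & SPEC =====
def Spec_preqCourse (lineSemester : String) (out : List String) : Prop := out = preqCourse_alt lineSemester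
instance (lineSemester : String) (out : List String) : Decidable (Spec_preqCourse lineSemester out) := by unfold Spec_preqCourse; infer_instance

-- ===== CLAIM (what is proved, stated in full; the proofs are below) =====
def Claim_equal_preqCourse : Prop := ∀ (lineSemester : String), Dom_preqCourse lineSemester → Spec_preqCourse lineSemester (preqCourse lineSemester)

-- ===== LEMMAS AND PROOFS =====

-- reference splitter on ',' (structural recursion; proofs relate both ports to it)
def mySplit (pre : List Char) : List Char → List (List Char)
  | [] => [pre]
  | c :: rest => if c = ',' then pre :: mySplit [] rest else mySplit (pre ++ [c]) rest

theorem mySplit_ne_nil (pre : List Char) (l : List Char) : mySplit pre l ≠ [] := by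
  induction l generalizing pre with
  | nil => simp [mySplit]
  | cons c rest ih => simp only [mySplit]; split <;> simp [ih]

-- fuel-based go of PySem.Chars.splitOn on a single-char separator equals mySplit
theorem go_eq (l : List Char) : ∀ (fuel : Nat) (cur : List Char) (acc : List (List Char)),
    l.length ≤ fuel →
    PySem.Chars.splitOn.go [','] fuel l cur acc = acc.reverse ++ mySplit cur.reverse l := by
  induction l with
  | nil =>
    intro fuel cur acc _
    cases fuel <;> simp [PySem.Chars.splitOn.go, mySplit]
  | cons c rest ih =>
    intro fuel cur acc h
    cases fuel with
    | zero => simp at h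
    | succ f =>
      have hrest : rest.length ≤ f := by simpa using h
      by_cases hc : c = ','
      · subst hc
        have hpre : [','].isPrefixOf (',' :: rest) = true := by simp [List.isPrefixOf]
        simp only [PySem.Chars.splitOn.go, hpre, if_true, List.length_cons, List.length_nil,
          List.drop_succ_cons, List.drop_zero]
        rw [ih f [] (cur.reverse :: acc) hrest]
        simp [mySplit]
      · have hpre : [','].isPrefixOf (c :: rest) = false := by simp [List.isPrefixOf]; exact fun h' => hc h'.symm
        simp only [PySem.Chars.splitOn.go, hpre, Bool.false_eq_true, if_false]
        rw [ih f (c :: cur) acc hrest]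
        simp [mySplit, hc]

theorem splitOn_eq_mySplit (cs : List Char) :
    PySem.Chars.splitOn cs [','] = mySplit [] cs := by
  have := go_eq cs (cs.length + 1) [] [] (by omega)
  simpa [PySem.Chars.splitOn] using this

theorem convert_eq_aux (w : List Char) : ∀ s : String,
    w.foldl (fun new x => new.push x) s = String.ofList (s.toList ++ w) := by
  induction w with
  | nil =>
    intro s
    rw [List.foldl_nil, List.append_nil]
    exact (String.ofList_toList (s := s)).symm
  | cons c rest ih =>
    intro s
    simp only [List.foldl_cons, ih]
    congr 1
    simp

theorem convert_eq (w : List Char) : convert w = String.ofList w := by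
  simpa using convert_eq_aux w ""

-- slice xs[1:-1] = tail then dropLast
theorem slice_one_neg_one {α : Type} (xs : List α) :
    PySem.List.slice xs (some 1) (some (-1)) = xs.tail.dropLast := by
  cases xs with
  | nil => rfl
  | cons x l =>
    simp only [PySem.List.slice, PySem.List.clampIdx, List.tail_cons]
    norm_num
    rw [if_neg (by omega : ¬ ((l.length : Int) < 0)), List.dropLast_eq_take]

-- the delimiter-branch of stepA on the normalized stream: spaces removed, '.' unified to ','
def normC (c : Char) : Char := if c = ',' ∨ c = '.' then ',' else c

def stepN (st : List String × List Char × Int) (c : Char) : List String × List Char × Int :=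
  if c = ',' then
    (if st.2.2 + 1 = 1 then (st.1, ([] : List Char), st.2.2 + 1)
     else (st.1 ++ [String.ofList st.2.1], ([] : List Char), st.2.2 + 1))
  else (st.1, st.2.1 ++ [c], st.2.2)

theorem foldA_eq_foldN (cs : List Char) : ∀ (st : List String × List Char × Int),
    cs.foldl stepA st = ((cs.filter (fun c => c ≠ ' ')).map normC).foldl stepN st := by
  induction cs with
  | nil => intro st; rfl
  | cons c rest ih =>
    intro st
    by_cases hs : c = ' '
    · subst hs
      rw [List.foldl_cons, show stepA st ' ' = st from by simp [stepA],
        show List.filter (fun c => decide (c ≠ ' ')) (' ' :: rest)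
            = List.filter (fun c => decide (c ≠ ' ')) rest from by simp]
      exact ih st
    · rw [List.foldl_cons,
        show List.filter (fun c => decide (c ≠ ' ')) (c :: rest)
            = c :: List.filter (fun c => decide (c ≠ ' ')) rest from by simp [hs],
        List.map_cons, List.foldl_cons,
        show stepN st (normC c) = stepA st c from ?_]
      · exact ih (stepA st c)
      · by_cases hd : c = ',' ∨ c = '.'
        · simp [stepA, stepN, normC, hs, hd, convert_eq]
        · have hc : c ≠ ',' := fun h => hd (Or.inl h)
          have hp : c ≠ '.' := fun h => hd (Or.inr h)
          simp [stepA, stepN, normC, hs, hc, hp]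

theorem phaseN1 (ds : List Char) : ∀ (acc : List String) (word : List Char) (i : Int), 1 ≤ i →
    (ds.foldl stepN (acc, word, i)).1 = acc ++ ((mySplit word ds).dropLast).map String.ofList := by
  induction ds with
  | nil => intro acc word i _; simp [mySplit]
  | cons c rest ih =>
    intro acc word i hi
    by_cases hc : c = ','
    · subst hc
      have hne : ¬ (i + 1 = 1) := by omega
      simp only [List.foldl_cons, stepN, if_pos, hne, if_false]
      rw [ih (acc ++ [String.ofList word]) [] (i + 1) (by omega)]
      rw [show mySplit word (',' :: rest) = word :: mySplit [] rest from by simp [mySplit]]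
      rw [List.dropLast_cons_of_ne_nil (mySplit_ne_nil [] rest)]
      simp
    · simp only [List.foldl_cons, stepN, if_neg hc]
      rw [ih acc (word ++ [c]) i hi]
      simp [mySplit, hc]

theorem phaseN0 (ds : List Char) : ∀ (word : List Char),
    (ds.foldl stepN ([], word, 0)).1 = (((mySplit word ds).drop 1).dropLast).map String.ofList := by
  induction ds with
  | nil => intro word; simp [mySplit]
  | cons c rest ih =>
    intro word
    by_cases hc : c = ','
    · subst hc
      simp only [List.foldl_cons, stepN, if_pos]
      norm_num
      rw [phaseN1 rest [] [] 1 (by omega)]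
      simp [mySplit]
    · simp only [List.foldl_cons, stepN, if_neg hc]
      rw [ih (word ++ [c])]
      simp [mySplit, hc]

-- ===== VERDICT (by name: the statement is the Claim_ definition above) =====
theorem preqCourse_spec : Claim_equal_preqCourse := by
  intro s _
  unfold Spec_preqCourse preqCourse preqCourse_alt
  rw [foldA_eq_foldN, phaseN0]
  rw [show (fun c => if c = ',' ∨ c = '.' then ',' else c) = normC from rfl]
  simp only [String.toList_ofList]
  rw [splitOn_eq_mySplit, slice_one_neg_one]
  simp [List.map_dropLast, ← List.map_tail, List.drop_one]
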